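-- pv_equiv track=rewrite | github.com/chaechef/algorithm | boj/삼성기출/14890.py | check_available_road
-- ===== SOURCE A (Python) =====
-- def check_available_road(arr: list, l: int) -> bool:
--     idx = 0
--     slide_check = [0] * len(arr)
--     while idx < len(arr):
--         if idx == len(arr) - 1:
--             return True
--         if arr[idx] == arr[idx+1]:
--             idx += 1
--             continue
--         if arr[idx] == arr[idx+1] + 1:
--             nextvalue = arr[idx+1]
--             for i in range(idx+1, idx+1+l):
--                 if i >= len(arr):
--                     return False
--                 if arr[i] != nextvalue:
--                     return False
--                 slide_check[i] = 1
--             idx = idx + l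
--         elif arr[idx] == arr[idx+1] - 1:
--             for i in range(idx + 1 - l, idx + 1):
--                 if i < 0:
--                     return False
--                 if arr[i] != arr[idx]:
--                     return False
--                 if slide_check[i] == 1:
--                     return False
--                 slide_check[i] = 1
--             idx += 1
--         else :
--             return False
--     return True
-- ===== SOURCE B (Python) =====
-- def check_available_road(arr: list, l: int) -> bool:
--     # Run-length compress the terrain, then judge each run boundary once.
--     if not arr:
--         return True
--     runs = []
--     h, cnt = arr[0], 1
--     for x in arr[1:]:
--         if x == h:
--             cnt += 1
--         else:
--             runs.append((h, cnt))
--             h, cnt = x, 1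
--     runs.append((h, cnt))
--     left_used = 0  # cells already covered by a ramp at the left end of the current run
--     for k in range(len(runs) - 1):
--         h1, n1 = runs[k]
--         h2, n2 = runs[k + 1]
--         if h1 == h2 + 1:      # step down: ramp occupies the first l cells of the next run
--             if l > n2:
--                 return False
--             left_used = l
--         elif h1 == h2 - 1:    # step up: ramp occupies the last l free cells of this run
--             if l > n1 - left_used:
--                 return False
--             left_used = 0
--         else:
--             return False
--     return True
-- ===== Notes on version B (the rewrite author's own statement) =====
-- stated objective: alternative
-- what changed: B run-length compresses the terrain once and judges each run boundary with a left_used counter per run, replacing A's cell-by-cell index walk with a global slide_check mark array and inner ramp-scanning loops.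
-- outside the precondition, e.g. on check_available_road([1, 1, 2], 0): A returns True, B returns True; on check_available_road([0, 3], -2): A returns False, B returns False
import Mathlib
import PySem

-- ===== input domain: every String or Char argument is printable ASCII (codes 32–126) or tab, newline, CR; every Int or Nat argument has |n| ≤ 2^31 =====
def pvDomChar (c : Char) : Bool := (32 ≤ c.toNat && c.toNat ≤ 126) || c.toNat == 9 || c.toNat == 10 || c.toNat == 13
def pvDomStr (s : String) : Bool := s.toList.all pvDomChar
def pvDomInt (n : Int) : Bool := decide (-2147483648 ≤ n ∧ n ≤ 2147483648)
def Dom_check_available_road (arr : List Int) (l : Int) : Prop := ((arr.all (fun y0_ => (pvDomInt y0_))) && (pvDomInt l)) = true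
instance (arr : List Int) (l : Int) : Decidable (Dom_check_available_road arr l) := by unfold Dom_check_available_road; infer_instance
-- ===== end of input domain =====

-- B re-implements the ramp check by run-length compressing the terrain and judging each
-- run boundary once (tracking ramp cells consumed at the left end of the current run),
-- instead of A's cell-by-cell scan with a global slide_check mark array (objective: alternative).

-- ===== PORT A =====
-- A's inner 'for i in range(idx+1, idx+1+l)' loop (none = an early 'return False')
def fwdGo (arr : List Int) (nv : Int) : List Int → List Int → Option (List Int)
  | sc, [] => some sc
  | sc, i :: is =>
    if (arr.length : Int) ≤ i then none
    else if ¬ ((PySem.List.pyGet? arr i).getD 0 = nv) then none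
    else fwdGo arr nv (sc.set i.toNat 1) is

-- A's inner 'for i in range(idx+1-l, idx+1)' loop (none = an early 'return False')
def bwdGo (arr : List Int) (cur : Int) : List Int → List Int → Option (List Int)
  | sc, [] => some sc
  | sc, i :: is =>
    if i < 0 then none
    else if ¬ ((PySem.List.pyGet? arr i).getD 0 = cur) then none
    else if sc.getD i.toNat 0 = 1 then none
    else bwdGo arr cur (sc.set i.toNat 1) is

-- A's while loop; the fuel arr.length + 1 is enough since idx strictly increases when 1 ≤ l
def loopA (arr : List Int) (l : Int) : Nat → Int → List Int → Bool
  | 0, _, _ => true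
  | fuel+1, idx, sc =>
    if idx < (arr.length : Int) then
      if idx = (arr.length : Int) - 1 then true
      else
        let a0 := (PySem.List.pyGet? arr idx).getD 0
        let a1 := (PySem.List.pyGet? arr (idx+1)).getD 0
        if a0 = a1 then loopA arr l fuel (idx+1) sc
        else if a0 = a1 + 1 then
          match fwdGo arr a1 sc (PySem.List.pyRange (idx+1) (idx+1+l) 1) with
          | none => false
          | some sc' => loopA arr l fuel (idx+l) sc'
        else if a0 = a1 - 1 then
          match bwdGo arr a0 sc (PySem.List.pyRange (idx+1-l) (idx+1) 1) with
          | none => false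
          | some sc' => loopA arr l fuel (idx+1) sc'
        else false
    else true

def check_available_road (arr : List Int) (l : Int) : Bool :=
  loopA arr l (arr.length + 1) 0 (List.replicate arr.length 0)

-- ===== PORT B =====
-- run-length encoding of the terrain (Source B's first loop)
def rleBuild (h cnt : Int) : List Int → List (Int × Int)
  | [] => [(h, cnt)]
  | x :: xs => if x = h then rleBuild h (cnt+1) xs else (h, cnt) :: rleBuild x 1 xs

-- Source B's boundary loop; the Int argument of the recursion is left_used
def goB (l : Int) : Int → List (Int × Int) → Bool
  | _, [] => true
  | _, [_] => true
  | lu, (h1, n1) :: (h2, n2) :: rest =>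
    if h1 = h2 + 1 then
      if n2 < l then false else goB l l ((h2, n2) :: rest)
    else if h1 = h2 - 1 then
      if n1 - lu < l then false else goB l 0 ((h2, n2) :: rest)
    else false

def check_available_road_alt (arr : List Int) (l : Int) : Bool :=
  match arr with
  | [] => true
  | a :: rest => goB l 0 (rleBuild a 1 rest)

-- ===== PRECONDITION & SPEC =====
-- Pre_ restricts to the puzzle's natural domain (ramp length l ≥ 1): for l ≤ 0 the Python A
-- loops forever on any terrain whose first unequal step goes down, and where it does return,
-- its value comes from empty ramp ranges on inputs outside the function's intended domain.
def Pre_check_available_road (arr : List Int) (l : Int) : Prop := 1 ≤ l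
instance (arr : List Int) (l : Int) : Decidable (Pre_check_available_road arr l) := by unfold Pre_check_available_road; infer_instance
def pvWitness_check_available_road : List Int × Int := ([1, 0, 0, 1], 2)

def Spec_check_available_road (arr : List Int) (l : Int) (out : Bool) : Prop := out = check_available_road_alt arr l
instance (arr : List Int) (l : Int) (out : Bool) : Decidable (Spec_check_available_road arr l out) := by unfold Spec_check_available_road; infer_instance

-- ===== CLAIM (what is proved, stated in full; the proofs are below) =====
def Claim_equal_check_available_road : Prop := ∀ (arr : List Int) (l : Int), Dom_check_available_road arr l → Pre_check_available_road arr l → Spec_check_available_road arr l (check_available_road arr l)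

-- ===== LEMMAS AND PROOFS =====

def runsFlat (rs : List (Int × Int)) : List Int := rs.flatMap (fun p => List.replicate p.2.toNat p.1)

lemma getD_set_char (sc : List Int) (n : Nat) (hn : n < sc.length) (pos : Nat) :
    ((sc.set n 1).getD pos 0 = 1 ↔ (pos = n ∨ sc.getD pos 0 = 1)) := by
  by_cases hp : pos = n
  · subst hp
    simp [List.getD, List.getElem?_set_self hn]
  · simp [List.getD, List.getElem?_set_ne (by omega : n ≠ pos), hp]

lemma fwdGo_none (arr : List Int) (nv : Int) :
    ∀ (is : List Int) (sc : List Int),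
      (∃ i ∈ is, (arr.length : Int) ≤ i ∨ (PySem.List.pyGet? arr i).getD 0 ≠ nv) →
      fwdGo arr nv sc is = none := by
  intro is
  induction is with
  | nil => intro sc h; simp at h
  | cons i is ih =>
    intro sc h
    obtain ⟨w, hw, hbad⟩ := h
    unfold fwdGo
    split
    · rfl
    · split
      · rfl
      · rename_i h1 h2
        apply ih
        rcases List.mem_cons.mp hw with rfl | hmem
        · rcases hbad with hb | hb
          · exact absurd hb h1
          · simp at h2; exact absurd h2 hb
        · exact ⟨w, hmem, hbad⟩

lemma fwdGo_some (arr : List Int) (nv : Int) :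
    ∀ (is : List Int) (sc : List Int),
      (∀ i ∈ is, 0 ≤ i ∧ i < (arr.length : Int) ∧ (PySem.List.pyGet? arr i).getD 0 = nv) →
      sc.length = arr.length →
      ∃ sc', fwdGo arr nv sc is = some sc' ∧ sc'.length = sc.length ∧
        ∀ pos : Nat, (sc'.getD pos 0 = 1 ↔ ((pos : Int) ∈ is ∨ sc.getD pos 0 = 1)) := by
  intro is
  induction is with
  | nil => intro sc _ _; exact ⟨sc, rfl, rfl, by simp⟩
  | cons i is ih =>
    intro sc hgood hlen
    obtain ⟨hi0, hilt, hival⟩ := hgood i (List.mem_cons_self)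
    have hset : (sc.set i.toNat 1).length = sc.length := by simp
    obtain ⟨sc', heq, hlen', hchar⟩ := ih (sc.set i.toNat 1)
      (fun w hw => hgood w (List.mem_cons_of_mem _ hw)) (by omega)
    refine ⟨sc', ?_, by omega, ?_⟩
    · unfold fwdGo
      rw [if_neg (by omega), if_neg (by simp [hival]), heq]
    · intro pos
      rw [hchar pos, List.mem_cons]
      have hns : i.toNat < sc.length := by omega
      rw [getD_set_char sc i.toNat hns pos]
      constructor
      · rintro (h | h | h)
        · exact Or.inl (Or.inr h)
        · exact Or.inl (Or.inl (by omega))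
        · exact Or.inr h
      · rintro ((h | h) | h)
        · exact Or.inr (Or.inl (by omega))
        · exact Or.inl h
        · exact Or.inr (Or.inr h)

lemma bwdGo_none (arr : List Int) (cur : Int) :
    ∀ (is : List Int) (sc : List Int),
      (∃ i ∈ is, i < 0 ∨ (PySem.List.pyGet? arr i).getD 0 ≠ cur) →
      bwdGo arr cur sc is = none := by
  intro is
  induction is with
  | nil => intro sc h; simp at h
  | cons i is ih =>
    intro sc h
    obtain ⟨w, hw, hbad⟩ := h
    unfold bwdGo
    split
    · rfl
    · split
      · rfl
      · split
        · rfl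
        · rename_i h1 h2 _
          apply ih
          rcases List.mem_cons.mp hw with rfl | hmem
          · rcases hbad with hb | hb
            · exact absurd hb h1
            · simp at h2; exact absurd h2 hb
          · exact ⟨w, hmem, hbad⟩

lemma bwdGo_some (arr : List Int) (cur : Int) :
    ∀ (is : List Int) (sc : List Int),
      is.Pairwise (· < ·) →
      (∀ i ∈ is, 0 ≤ i ∧ i < (arr.length : Int) ∧ (PySem.List.pyGet? arr i).getD 0 = cur ∧ sc.getD i.toNat 0 ≠ 1) →
      sc.length = arr.length →
      ∃ sc', bwdGo arr cur sc is = some sc' ∧ sc'.length = sc.length ∧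
        ∀ pos : Nat, (sc'.getD pos 0 = 1 ↔ ((pos : Int) ∈ is ∨ sc.getD pos 0 = 1)) := by
  intro is
  induction is with
  | nil => intro sc _ _ _; exact ⟨sc, rfl, rfl, by simp⟩
  | cons i is ih =>
    intro sc hpair hgood hlen
    obtain ⟨hi0, hilt, hival, hisc⟩ := hgood i (List.mem_cons_self)
    have hns : i.toNat < sc.length := by omega
    obtain ⟨sc', heq, hlen', hchar⟩ := ih (sc.set i.toNat 1) (List.Pairwise.of_cons hpair)
      (fun w hw => by
        obtain ⟨a, b, c, d⟩ := hgood w (List.mem_cons_of_mem _ hw)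
        have hiw : i < w := (List.pairwise_cons.mp hpair).1 w hw
        refine ⟨a, b, c, ?_⟩
        intro hcon
        rcases (getD_set_char sc i.toNat hns w.toNat).mp hcon with he | he
        · omega
        · exact d he) (by simp [hlen])
    refine ⟨sc', ?_, by simp at hlen'; omega, ?_⟩
    · unfold bwdGo
      rw [if_neg (by omega), if_neg (by simp [hival]), if_neg hisc, heq]
    · intro pos
      rw [hchar pos, List.mem_cons, getD_set_char sc i.toNat hns pos]
      constructor
      · rintro (h | h | h)
        · exact Or.inl (Or.inr h)
        · exact Or.inl (Or.inl (by omega))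
        · exact Or.inr h
      · rintro ((h | h) | h)
        · exact Or.inr (Or.inl (by omega))
        · exact Or.inl h
        · exact Or.inr (Or.inr h)

lemma getInRun (pre : List Int) (n : Nat) (h : Int) (tail : List Int) (i : Int)
    (h1 : (pre.length : Int) ≤ i) (h2 : i < (pre.length : Int) + n) :
    (PySem.List.pyGet? (pre ++ List.replicate n h ++ tail) i).getD 0 = h := by
  rw [PySem.List.pyGet?_of_nonneg (h := by omega)]
  rw [List.append_assoc]
  rw [List.getElem?_append_right (by omega)]
  rw [List.getElem?_append_left (by simp; omega)]
  rw [List.getElem?_replicate_of_lt (by omega)]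
  rfl

lemma rle_spec : ∀ (xs : List Int) (h cnt : Int), 1 ≤ cnt →
    runsFlat (rleBuild h cnt xs) = List.replicate cnt.toNat h ++ xs ∧
    (∀ p ∈ rleBuild h cnt xs, 1 ≤ p.2) ∧
    List.IsChain (fun p q => p.1 ≠ q.1) (rleBuild h cnt xs) ∧
    (∃ n rs, rleBuild h cnt xs = (h, n) :: rs) := by
  intro xs
  induction xs with
  | nil =>
    intro h cnt hc
    refine ⟨by simp [runsFlat, rleBuild], ?_, by rw [rleBuild]; exact List.isChain_singleton _, ⟨cnt, [], by simp [rleBuild]⟩⟩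
    intro p hp
    simp [rleBuild] at hp
    subst hp; exact hc
  | cons x xs ih =>
    intro h cnt hc
    by_cases hx : x = h
    · subst hx
      obtain ⟨hflat, hcnt, hchain, n, rs, hshape⟩ := ih x (cnt + 1) (by omega)
      rw [rleBuild, if_pos rfl]
      refine ⟨?_, hcnt, hchain, ⟨n, rs, hshape⟩⟩
      rw [hflat]
      have h1 : (cnt + 1).toNat = cnt.toNat + 1 := by omega
      rw [h1, List.replicate_succ', List.append_assoc]
      simp
    · obtain ⟨hflat, hcnt, hchain, n, rs, hshape⟩ := ih x 1 (by omega)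
      rw [rleBuild, if_neg hx]
      refine ⟨?_, ?_, ?_, ⟨cnt, _, rfl⟩⟩
      · simp only [runsFlat, List.flatMap_cons]
        show _ ++ runsFlat (rleBuild x 1 xs) = _
        rw [hflat]; simp
      · intro p hp
        rcases List.mem_cons.mp hp with rfl | hm
        · exact hc
        · exact hcnt p hm
      · rw [hshape] at hchain ⊢
        exact List.isChain_cons_cons.mpr ⟨by simpa using fun he => hx he.symm, hchain⟩
lemma mainLoop (l : Int) (hl : 1 ≤ l) (fuel : Nat) :
    ∀ (pre : List Int) (h1 n1 : Int) (runs : List (Int × Int)) (j : Nat) (lu : Int) (sc : List Int),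
    1 ≤ n1 →
    (∀ p ∈ runs, 1 ≤ p.2) →
    List.IsChain (fun p q => p.1 ≠ q.1) ((h1, n1) :: runs) →
    (∀ x, pre.getLast? = some x → x ≠ h1) →
    j < n1.toNat →
    0 ≤ lu → lu ≤ n1 →
    sc.length = pre.length + n1.toNat + (runsFlat runs).length →
    (∀ pos : Nat, pre.length ≤ pos → (sc.getD pos 0 = 1 ↔ (pos : Int) < (pre.length : Int) + lu)) →
    n1.toNat + (runsFlat runs).length - j ≤ fuel →
    loopA (pre ++ List.replicate n1.toNat h1 ++ runsFlat runs) l fuel ((pre.length : Int) + j) sc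
      = goB l lu ((h1, n1) :: runs) := by
  induction fuel with
  | zero =>
    intro pre h1 n1 runs j lu sc hn1 _ _ _ hj _ _ _ _ hfuel
    omega
  | succ f ih =>
    intro pre h1 n1 runs j lu sc hn1 hruns hchain hpre hj hlu0 hlu1 hlen hinv hfuel
    have hN : (n1.toNat : Int) = n1 := Int.toNat_of_nonneg (by omega)
    set arr := pre ++ List.replicate n1.toNat h1 ++ runsFlat runs with harr
    have hlenA : arr.length = pre.length + n1.toNat + (runsFlat runs).length := by
      simp [harr]; omega
    rw [loopA]
    rw [if_pos (by push_cast; omega)]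
    by_cases hlast : j = n1.toNat - 1 ∧ runs = []
    · obtain ⟨hj', hr⟩ := hlast
      subst hr
      rw [if_pos (by simp [runsFlat] at hlenA ⊢; push_cast; omega)]
      rfl
    · have hFpos : runs ≠ [] → 1 ≤ (runsFlat runs).length := by
        intro hne
        match runs, hne with
        | (h2, n2) :: rest, _ =>
          have : 1 ≤ n2 := hruns (h2, n2) List.mem_cons_self
          simp [runsFlat]
          omega
      have hne : ¬ ((pre.length : Int) + j = (arr.length : Int) - 1) := by
        by_cases hr : runs = []
        · subst hr
          simp [runsFlat] at hlenA
          have hj' : j ≠ n1.toNat - 1 := fun hh => hlast ⟨hh, rfl⟩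
          push_cast [hlenA]
          omega
        · have := hFpos hr
          push_cast [hlenA]
          omega
      rw [if_neg hne]
      show (if _ = _ then _ else _) = _
      have ha0 : (PySem.List.pyGet? arr ((pre.length : Int) + j)).getD 0 = h1 := by
        rw [harr]; exact getInRun _ _ _ _ _ (by omega) (by push_cast; omega)
      by_cases hmid : j + 1 < n1.toNat
      · have ha1 : (PySem.List.pyGet? arr ((pre.length : Int) + j + 1)).getD 0 = h1 := by
          rw [harr]
          exact getInRun _ _ _ _ _ (by omega) (by push_cast; omega)
        rw [ha0, ha1, if_pos rfl]
        have hc : ((pre.length : Int) + j + 1) = ((pre.length : Int) + (j+1 : Nat)) := by push_cast; omega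
        rw [hc]
        exact ih pre h1 n1 runs (j+1) lu sc hn1 hruns hchain hpre hmid hlu0 hlu1 hlen hinv (by omega)
      · -- j = n1.toNat - 1, at the run boundary
        have hj1 : j = n1.toNat - 1 := by omega
        match runs, hlast with
        | [], hlast => exact absurd ⟨hj1, rfl⟩ hlast
        | (h2, n2) :: rest, _ =>
        have hn2 : 1 ≤ n2 := hruns (h2, n2) List.mem_cons_self
        have hN2 : (n2.toNat : Int) = n2 := Int.toNat_of_nonneg (by omega)
        have hrest : ∀ p ∈ rest, 1 ≤ p.2 := fun p hp => hruns p (List.mem_cons_of_mem _ hp)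
        have hflat : runsFlat ((h2, n2) :: rest) = List.replicate n2.toNat h2 ++ runsFlat rest := by
          simp [runsFlat]
        have harr2 : arr = (pre ++ List.replicate n1.toNat h1) ++ List.replicate n2.toNat h2 ++ runsFlat rest := by
          rw [harr, hflat]; simp
        have hlenP : ((pre ++ List.replicate n1.toNat h1).length : Int) = (pre.length : Int) + n1.toNat := by
          simp
        have hF : (runsFlat ((h2, n2) :: rest)).length = n2.toNat + (runsFlat rest).length := by
          rw [hflat]; simp
        have ha1 : (PySem.List.pyGet? arr ((pre.length : Int) + j + 1)).getD 0 = h2 := by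
          rw [harr2]
          exact getInRun _ _ _ _ _ (by rw [hlenP]; omega) (by rw [hlenP]; omega)
        have hchain2 := List.isChain_cons_cons.mp hchain
        have hne12 : h1 ≠ h2 := hchain2.1
        have hgl : (pre ++ List.replicate n1.toNat h1).getLast? = some h1 := by
          have h1n : n1.toNat = (n1.toNat - 1) + 1 := by omega
          rw [List.getLast?_append, h1n, List.getLast?_replicate]
          simp
        have hpre' : ∀ x, (pre ++ List.replicate n1.toNat h1).getLast? = some x → x ≠ h2 := by
          intro x hx
          rw [hgl] at hx
          cases hx
          exact hne12
        rw [ha0, ha1, if_neg hne12]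
        rw [goB]
        have hlenAi : (arr.length : Int) = (pre.length : Int) + ↑n1.toNat + ↑n2.toNat + ↑(runsFlat rest).length := by
          rw [hlenA, hF]; push_cast; omega
        by_cases hd : h1 = h2 + 1
        · rw [if_pos hd, if_pos hd]
          have hSrw : ((pre.length : Int) + ↑j + 1) = ((pre.length : Int) + ↑n1.toNat) := by omega
          rw [hSrw]
          by_cases hln2 : n2 < l
          · rw [if_pos hln2]
            have hnone : fwdGo arr h2 sc (PySem.List.pyRange ((pre.length : Int) + ↑n1.toNat) ((pre.length : Int) + ↑n1.toNat + l) 1) = none := by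
              apply fwdGo_none
              refine ⟨(pre.length : Int) + ↑n1.toNat + n2, PySem.List.mem_pyRange_one.mpr ⟨by omega, by omega⟩, ?_⟩
              match rest, hrest with
              | [], _ =>
                left
                rw [hlenAi]
                simp [runsFlat]
                omega
              | (h3, n3) :: rest', hr3 =>
                right
                have hn3 : 1 ≤ n3 := hr3 (h3, n3) List.mem_cons_self
                have harr3 : arr = ((pre ++ List.replicate n1.toNat h1) ++ List.replicate n2.toNat h2) ++ List.replicate n3.toNat h3 ++ runsFlat rest' := by
                  rw [harr2]
                  simp [runsFlat]
                have hval : (PySem.List.pyGet? arr ((pre.length : Int) + ↑n1.toNat + n2)).getD 0 = h3 := by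
                  rw [harr3]
                  apply getInRun
                  · simp; omega
                  · simp; omega
                rw [hval]
                have hne23 := (List.isChain_cons_cons.mp hchain2.2).1
                simp at hne23 ⊢
                exact fun he => hne23 he.symm
            rw [hnone]
          · rw [if_neg hln2]
            obtain ⟨sc', heq, hlen', hchar⟩ := fwdGo_some arr h2
              (PySem.List.pyRange ((pre.length : Int) + ↑n1.toNat) ((pre.length : Int) + ↑n1.toNat + l) 1) sc
              (by
                intro i hi
                obtain ⟨hi1, hi2⟩ := PySem.List.mem_pyRange_one.mp hi
                refine ⟨by omega, by omega, ?_⟩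
                rw [harr2]
                apply getInRun
                · rw [hlenP]; omega
                · rw [hlenP]; omega) (by omega)
            rw [heq]
            show loopA arr l f ((pre.length : Int) + ↑j + l) sc' = goB l l ((h2, n2) :: rest)
            have hihres := ih (pre ++ List.replicate n1.toNat h1) h2 n2 rest (l.toNat - 1) l sc' hn2 hrest hchain2.2 hpre'
              (by omega) (by omega) (by omega)
              (by simp at hlen' ⊢; omega)
              (by
                intro pos hpos
                rw [hchar pos, PySem.List.mem_pyRange_one]
                have hlen1 : (pre ++ List.replicate n1.toNat h1).length = pre.length + n1.toNat := by simp
                rw [hlen1] at hpos ⊢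
                have hscold : ¬ (sc.getD pos 0 = 1) := by
                  rw [hinv pos (by omega)]
                  push_cast
                  omega
                simp only [hscold, or_false]
                push_cast
                omega)
              (by omega)
            rw [show ((pre.length : Int) + ↑j + l) = (((pre ++ List.replicate n1.toNat h1).length : Int) + ↑(l.toNat - 1)) from by simp; omega, harr2]
            exact hihres
        · rw [if_neg hd, if_neg hd]
          by_cases hu : h1 = h2 - 1
          · rw [if_pos hu, if_pos hu]
            have hSrw : ((pre.length : Int) + ↑j + 1) = ((pre.length : Int) + ↑n1.toNat) := by omega
            rw [hSrw]
            by_cases hl_n1 : n1 < l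
            · rw [if_pos (by omega)]
              have hnone : bwdGo arr h1 sc (PySem.List.pyRange ((pre.length : Int) + ↑n1.toNat - l) ((pre.length : Int) + ↑n1.toNat) 1) = none := by
                apply bwdGo_none
                refine ⟨(pre.length : Int) - 1, PySem.List.mem_pyRange_one.mpr ⟨by omega, by omega⟩, ?_⟩
                by_cases hP : pre.length = 0
                · left; omega
                · right
                  have h0le : (0 : Int) ≤ (pre.length : Int) - 1 := by omega
                  rw [PySem.List.pyGet?_of_nonneg (h := h0le)]
                  have htn : ((pre.length : Int) - 1).toNat = pre.length - 1 := by omega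
                  rw [htn, harr, List.append_assoc, List.getElem?_append_left (by omega)]
                  have hgl2 : pre[pre.length - 1]? = pre.getLast? := by
                    rw [List.getLast?_eq_getElem?]
                  rw [hgl2]
                  match hgp : pre.getLast? with
                  | none =>
                    match pre, hP with
                    | p :: ps, _ => simp at hgp
                  | some x =>
                    have := hpre x hgp
                    simpa using this
              rw [hnone]
            · by_cases hov : n1 - lu < l
              · rw [if_pos hov]
                rw [PySem.List.pyRange_one_cons (by omega)]
                rw [bwdGo]
                rw [if_neg (by omega)]
                have hval : (PySem.List.pyGet? arr ((pre.length : Int) + ↑n1.toNat - l)).getD 0 = h1 := by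
                  rw [harr]
                  exact getInRun _ _ _ _ _ (by omega) (by omega)
                rw [if_neg (by push_neg; exact hval)]
                have hmark : sc.getD ((pre.length : Int) + ↑n1.toNat - l).toNat 0 = 1 := by
                  rw [hinv _ (by omega)]
                  omega
                rw [if_pos hmark]
              · rw [if_neg hov]
                obtain ⟨sc', heq, hlen', hchar⟩ := bwdGo_some arr h1
                  (PySem.List.pyRange ((pre.length : Int) + ↑n1.toNat - l) ((pre.length : Int) + ↑n1.toNat) 1) sc
                  (PySem.List.pairwise_lt_pyRange_one _ _)
                  (by
                    intro i hi
                    obtain ⟨hi1, hi2⟩ := PySem.List.mem_pyRange_one.mp hi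
                    refine ⟨by omega, by omega, ?_, ?_⟩
                    · rw [harr]
                      exact getInRun _ _ _ _ _ (by omega) (by omega)
                    · intro hcc
                      rw [hinv _ (by omega)] at hcc
                      omega) (by omega)
                rw [heq]
                show loopA arr l f ((pre.length : Int) + ↑n1.toNat) sc' = goB l 0 ((h2, n2) :: rest)
                have hihres := ih (pre ++ List.replicate n1.toNat h1) h2 n2 rest 0 0 sc' hn2 hrest hchain2.2 hpre'
                  (by omega) (by omega) (by omega)
                  (by simp at hlen' ⊢; omega)
                  (by
                    intro pos hpos
                    rw [hchar pos, PySem.List.mem_pyRange_one]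
                    have hlen1 : (pre ++ List.replicate n1.toNat h1).length = pre.length + n1.toNat := by simp
                    rw [hlen1] at hpos ⊢
                    have hscold : ¬ (sc.getD pos 0 = 1) := by
                      rw [hinv pos (by omega)]
                      push_cast
                      omega
                    simp only [hscold, or_false]
                    push_cast
                    omega)
                  (by omega)
                rw [show ((pre.length : Int) + ↑n1.toNat) = (((pre ++ List.replicate n1.toNat h1).length : Int) + ↑(0 : Nat)) from by simp, harr2]
                exact hihres
          · rw [if_neg hu, if_neg hu]

-- ===== VERDICT (by name: the statement is the Claim_ definition above) =====
theorem check_available_road_spec : Claim_equal_check_available_road := by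
  intro arr l _ hpre
  unfold Spec_check_available_road
  have hl : 1 ≤ l := hpre
  match arr with
  | [] => rfl
  | a :: rest =>
    obtain ⟨hflat, hcnt, hchain, n1, runs', hshape⟩ := rle_spec rest a 1 (by omega)
    unfold check_available_road check_available_road_alt
    show loopA (a :: rest) l ((a :: rest).length + 1) 0 (List.replicate (a :: rest).length 0) = goB l 0 (rleBuild a 1 rest)
    rw [hshape]
    have hn1 : 1 ≤ n1 := hcnt (a, n1) (by rw [hshape]; exact List.mem_cons_self)
    have hsplit : runsFlat ((a, n1) :: runs') = List.replicate n1.toNat a ++ runsFlat runs' := by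
      simp [runsFlat]
    have harr : a :: rest = List.replicate n1.toNat a ++ runsFlat runs' := by
      rw [hshape, hsplit] at hflat
      simpa using hflat.symm
    rw [hshape] at hchain
    have hres := mainLoop l hl ((a :: rest).length + 1) [] a n1 runs' 0 0
      (List.replicate (a :: rest).length 0) hn1
      (fun p hp => hcnt p (by rw [hshape]; exact List.mem_cons_of_mem _ hp))
      hchain (by simp) (by omega) (by omega) (by omega)
      (by simp [harr])
      (by intro pos _; simp)
      (by rw [harr]; simp)
    rw [show ((List.length ([] : List Int) : Int) + ((0 : Nat) : Int)) = 0 from by simp] at hres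
    rw [show ([] : List Int) ++ List.replicate n1.toNat a ++ runsFlat runs' = List.replicate n1.toNat a ++ runsFlat runs' from by simp] at hres
    rw [← harr] at hres
    exact hres
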